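-- pv_equiv track=rewrite | github.com/joshm20/Crochet-Color-Pooling | CrochetingCalculationsColorama.py | grid_generator
-- ===== SOURCE A (Python) =====
-- def grid_generator(stitches, num_rows, clusters):
--     """Generates a grid representing the shifts.
--
--     Args:
--         stitches (list): The stitch pattern
--         num_rows (int): How many rows do you want the pattern to run for
--         clusters (int): How many stitches wide
--
--     Returns:
--         list: The grid
--     """
--     grid = []
--     row_indicator = 1
--     stitches_length = len(stitches)
--     i = 0
--     for num in range(num_rows):
--         row = []
--
--         while len(row) < clusters:
--             row.append(stitches[i])
--             i = (i + 1) % stitches_length  # Prove that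
--
--         if row_indicator % 2 != 0:
--             grid.append((row_indicator, row[::-1]))
--         else:
--             grid.append((row_indicator, row))
--
--         row_indicator += 1
--
--     reversed_grid = list(reversed(grid))
--     return reversed_grid
-- ===== SOURCE B (Python) =====
-- def grid_generator(stitches, num_rows, clusters):
--     """Staged pipeline: replicate the pattern into one flat stream, chunk it
--     into rows by slicing, decorate with 1-based indicators (reversing odd
--     rows), and reverse the grid.  No running cursor, no per-element modular
--     indexing."""
--     r = max(num_rows, 0)
--     c = max(clusters, 0)
--     total = r * c
--     reps = -(-total // len(stitches)) if total else 0
--     flat = stitches * reps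
--     if c:
--         chunks = [flat[p:p + c] for p in range(0, total, c)]
--     else:
--         chunks = [[]] * r
--     grid = [(k + 1, row[::-1] if k % 2 == 0 else row)
--             for k, row in enumerate(chunks)]
--     return grid[::-1]
-- ===== Notes on version B (the rewrite author's own statement) =====
-- stated objective: alternative
-- what changed: Replaces A's single loop with a running stitch cursor threaded across rows by a staged pipeline: replicate the pattern once into a flat stream (list multiplication with a ceiling-division count), cut it into rows by slicing, decorate with enumerate (reversing even-index rows), and reverse the grid.
import Mathlib
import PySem

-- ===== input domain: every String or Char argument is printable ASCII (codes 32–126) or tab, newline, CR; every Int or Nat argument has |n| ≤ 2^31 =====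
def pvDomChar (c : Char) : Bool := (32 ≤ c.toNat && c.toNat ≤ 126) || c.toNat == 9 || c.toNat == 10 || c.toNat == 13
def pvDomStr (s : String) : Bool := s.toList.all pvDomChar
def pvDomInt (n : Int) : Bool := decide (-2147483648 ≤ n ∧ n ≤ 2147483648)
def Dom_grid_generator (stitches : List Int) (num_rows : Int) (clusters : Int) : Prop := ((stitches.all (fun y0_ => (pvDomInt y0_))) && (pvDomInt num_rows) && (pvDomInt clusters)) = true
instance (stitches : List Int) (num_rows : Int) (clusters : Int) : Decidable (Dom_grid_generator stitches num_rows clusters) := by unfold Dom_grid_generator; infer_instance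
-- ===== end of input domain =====

-- B replaces A's running-cursor row builder by a staged pipeline: replicate the
-- pattern into one flat stream, chunk it by slicing, decorate, reverse (objective: alternative).


-- ===== PORT A =====
-- the inner 'while len(row) < clusters' loop: runs clusters.toNat times, appending
-- stitches[i] and setting i = (i+1) % len(stitches).  stitches[i] is always in range
-- under Pre_ (i stays in [0, len)); pyGetD's default 0 is never reached there.
def ggWhile (stitches : List Int) : Nat → List Int → Int → List Int × Int
  | 0, row, i => (row, i)
  | n + 1, row, i =>
      ggWhile stitches n (row ++ [PySem.List.pyGetD stitches i 0])
        (PySem.Int.mod (i + 1) (stitches.length : Int))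

def grid_generator (stitches : List Int) (num_rows : Int) (clusters : Int) : List (Int × List Int) :=
  let st := (PySem.List.pyRange 0 num_rows 1).foldl
    (fun (st : List (Int × List Int) × Int × Int) _num =>
      let grid := st.1
      let row_indicator := st.2.1
      let i := st.2.2
      let ri := ggWhile stitches clusters.toNat [] i
      let grid' :=
        if PySem.Int.mod row_indicator 2 ≠ 0 then grid ++ [(row_indicator, ri.1.reverse)]
        else grid ++ [(row_indicator, ri.1)]
      (grid', row_indicator + 1, ri.2))
    ([], 1, 0)
  st.1.reverse

-- ===== PORT B =====
-- staged pipeline of Source B: flat = stitches * reps (ceiling division), chunks by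
-- slicing, decorate with enumerate, reverse at the end.  Under Pre_ the division
-- is by len(stitches) ≠ 0 whenever total ≠ 0; pyRepeat/slice are Python-exact.
def grid_generator_alt (stitches : List Int) (num_rows : Int) (clusters : Int) : List (Int × List Int) :=
  let r := max num_rows 0
  let c := max clusters 0
  let total := r * c
  let reps := if total ≠ 0 then -(PySem.Int.floordiv (-total) (stitches.length : Int)) else 0
  let flat := PySem.List.pyRepeat stitches reps
  let chunks :=
    if c ≠ 0 then
      (PySem.List.pyRange 0 total c).map (fun p => PySem.List.slice flat (some p) (some (p + c)))
    else PySem.List.pyRepeat [([] : List Int)] r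
  let grid := (PySem.List.enumerate chunks 0).map
    (fun kr => (kr.1 + 1, if PySem.Int.mod kr.1 2 = 0 then kr.2.reverse else kr.2))
  grid.reverse

-- ===== PRECONDITION & SPEC =====
-- Pre_ excludes only the inputs on which A raises (IndexError from stitches[i] when
-- stitches is empty but at least one non-empty row is demanded); B raises there too
-- (ZeroDivisionError in the ceiling division).
def Pre_grid_generator (stitches : List Int) (num_rows : Int) (clusters : Int) : Prop :=
  ¬ (stitches = [] ∧ 0 < num_rows ∧ 0 < clusters)
instance (stitches : List Int) (num_rows : Int) (clusters : Int) : Decidable (Pre_grid_generator stitches num_rows clusters) := by unfold Pre_grid_generator; infer_instance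

def pvWitness_grid_generator : List Int × Int × Int := ([1, 2, 3], 4, 5)

def Spec_grid_generator (stitches : List Int) (num_rows : Int) (clusters : Int) (out : List (Int × List Int)) : Prop := out = grid_generator_alt stitches num_rows clusters
instance (stitches : List Int) (num_rows : Int) (clusters : Int) (out : List (Int × List Int)) : Decidable (Spec_grid_generator stitches num_rows clusters out) := by unfold Spec_grid_generator; infer_instance

-- ===== CLAIM (what is proved, stated in full; the proofs are below) =====
def Claim_equal_grid_generator : Prop := ∀ (stitches : List Int) (num_rows : Int) (clusters : Int), Dom_grid_generator stitches num_rows clusters → Pre_grid_generator stitches num_rows clusters → Spec_grid_generator stitches num_rows clusters (grid_generator stitches num_rows clusters)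

-- ===== LEMMAS AND PROOFS =====

-- proof-only helpers: the pair A emits for indicator ri, and the stitch row starting at offset t
def mkOut (ri : Int) (row : List Int) : Int × List Int :=
  if PySem.Int.mod ri 2 ≠ 0 then (ri, row.reverse) else (ri, row)

def rowAt (stitches : List Int) (c : Nat) (t : Int) : List Int :=
  (List.range c).map (fun (j : Nat) => PySem.List.pyGetD stitches
    (PySem.Int.mod (t + (j : Int)) (stitches.length : Int)) 0)

theorem mod_shift (L t a : Int) (hL : 0 < L) :
    PySem.Int.mod (PySem.Int.mod t L + a) L = PySem.Int.mod (t + a) L := by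
  rw [PySem.Int.mod_eq_emod_of_pos hL, PySem.Int.mod_eq_emod_of_pos hL,
    PySem.Int.mod_eq_emod_of_pos hL, Int.add_emod, Int.add_emod t a,
    Int.emod_emod_of_dvd t dvd_rfl]

theorem rowAt_zero (stitches : List Int) (t : Int) : rowAt stitches 0 t = [] := by
  simp [rowAt]

theorem rowAt_succ (stitches : List Int) (n : Nat) (t : Int) :
    rowAt stitches (n + 1) t =
      PySem.List.pyGetD stitches (PySem.Int.mod t (stitches.length : Int)) 0
        :: rowAt stitches n (t + 1) := by
  simp only [rowAt, List.range_succ_eq_map, List.map_cons, List.map_map]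
  refine List.cons_eq_cons.mpr ⟨by norm_num, ?_⟩
  refine List.map_congr_left (fun j _ => ?_)
  simp only [Function.comp]
  congr 2
  push_cast
  ring

theorem ggWhile_closed (stitches : List Int) (hs : stitches ≠ []) :
    ∀ (n : Nat) (row : List Int) (t : Int),
      ggWhile stitches n row (PySem.Int.mod t (stitches.length : Int)) =
        (row ++ rowAt stitches n t, PySem.Int.mod (t + (n : Int)) (stitches.length : Int)) := by
  have hL : 0 < (stitches.length : Int) := by
    have := List.length_pos_iff.mpr hs
    exact_mod_cast this
  intro n
  induction n with
  | zero => intro row t; simp [ggWhile, rowAt_zero]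
  | succ n ih =>
      intro row t
      rw [ggWhile, mod_shift _ _ _ hL, ih (row ++ [_]) (t + 1), rowAt_succ]
      refine Prod.ext ?_ ?_
      · simp
      · show PySem.Int.mod (t + 1 + (n : Int)) _ = PySem.Int.mod (t + ((n : Nat) + 1 : Nat)) _
        congr 1
        push_cast
        ring

theorem append_mkOut (grid : List (Int × List Int)) (ri : Int) (row : List Int) :
    (if PySem.Int.mod ri 2 ≠ 0 then grid ++ [(ri, row.reverse)] else grid ++ [(ri, row)])
      = grid ++ [mkOut ri row] := by
  unfold mkOut; split_ifs <;> rfl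

theorem foldA (stitches : List Int) (clusters : Int) (hs : stitches ≠ []) :
    ∀ (l : List Int) (grid : List (Int × List Int)) (ri t : Int),
      l.foldl
        (fun (st : List (Int × List Int) × Int × Int) _num =>
          let grid := st.1
          let row_indicator := st.2.1
          let i := st.2.2
          let ri := ggWhile stitches clusters.toNat [] i
          let grid' :=
            if PySem.Int.mod row_indicator 2 ≠ 0 then grid ++ [(row_indicator, ri.1.reverse)]
            else grid ++ [(row_indicator, ri.1)]
          (grid', row_indicator + 1, ri.2))
        (grid, ri, PySem.Int.mod t (stitches.length : Int)) =
      (grid ++ (List.range l.length).map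
          (fun (k : Nat) => mkOut (ri + (k : Int)) (rowAt stitches clusters.toNat (t + (k : Int) * (clusters.toNat : Int)))),
       ri + (l.length : Int), PySem.Int.mod (t + (l.length : Int) * (clusters.toNat : Int)) (stitches.length : Int)) := by
  intro l
  induction l with
  | nil => intro grid ri t; simp
  | cons x l ih =>
      intro grid ri t
      rw [List.foldl_cons]
      have hstep :
          (if PySem.Int.mod ri 2 ≠ 0 then
              grid ++ [(ri, (ggWhile stitches clusters.toNat [] (PySem.Int.mod t (stitches.length : Int))).1.reverse)]
            else grid ++ [(ri, (ggWhile stitches clusters.toNat [] (PySem.Int.mod t (stitches.length : Int))).1)],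
            ri + 1, (ggWhile stitches clusters.toNat [] (PySem.Int.mod t (stitches.length : Int))).2)
          = (grid ++ [mkOut ri (rowAt stitches clusters.toNat t)], ri + 1,
              PySem.Int.mod (t + (clusters.toNat : Int)) (stitches.length : Int)) := by
        rw [ggWhile_closed stitches hs clusters.toNat [] t]
        dsimp only
        rw [List.nil_append, append_mkOut]
      show l.foldl _ (if PySem.Int.mod ri 2 ≠ 0 then
              grid ++ [(ri, (ggWhile stitches clusters.toNat [] (PySem.Int.mod t (stitches.length : Int))).1.reverse)]
            else grid ++ [(ri, (ggWhile stitches clusters.toNat [] (PySem.Int.mod t (stitches.length : Int))).1)],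
            ri + 1, (ggWhile stitches clusters.toNat [] (PySem.Int.mod t (stitches.length : Int))).2) = _
      rw [hstep, ih (grid ++ [mkOut ri (rowAt stitches clusters.toNat t)]) (ri + 1) (t + (clusters.toNat : Int))]
      refine Prod.ext ?_ (Prod.ext ?_ ?_)
      · show (grid ++ [mkOut ri (rowAt stitches clusters.toNat t)]) ++ _ = grid ++ _
        rw [List.append_assoc, List.length_cons, List.range_succ_eq_map, List.map_cons, List.map_map]
        refine congrArg (grid ++ ·) (List.cons_eq_cons.mpr ⟨by norm_num, ?_⟩)
        refine List.map_congr_left (fun k _ => ?_)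
        simp only [Function.comp]
        congr 1
        · push_cast; ring
        · congr 1; push_cast; ring
      · show ri + 1 + ((l.length : Nat) : Int) = ri + (((x :: l).length : Nat) : Int)
        simp only [List.length_cons]; push_cast; ring
      · show PySem.Int.mod (t + (clusters.toNat : Int) + (l.length : Int) * (clusters.toNat : Int)) _ = _
        congr 1
        simp only [List.length_cons]; push_cast; ring

theorem foldA0 (stitches : List Int) (clusters : Int) (hc : clusters.toNat = 0) :
    ∀ (l : List Int) (grid : List (Int × List Int)) (ri i : Int),
      l.foldl
        (fun (st : List (Int × List Int) × Int × Int) _num =>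
          let grid := st.1
          let row_indicator := st.2.1
          let i := st.2.2
          let ri := ggWhile stitches clusters.toNat [] i
          let grid' :=
            if PySem.Int.mod row_indicator 2 ≠ 0 then grid ++ [(row_indicator, ri.1.reverse)]
            else grid ++ [(row_indicator, ri.1)]
          (grid', row_indicator + 1, ri.2))
        (grid, ri, i) =
      (grid ++ (List.range l.length).map (fun (k : Nat) => mkOut (ri + (k : Int)) []),
       ri + (l.length : Int), i) := by
  intro l
  induction l with
  | nil => intro grid ri i; simp
  | cons x l ih =>
      intro grid ri i
      rw [List.foldl_cons]
      have hstep :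
          (if PySem.Int.mod ri 2 ≠ 0 then
              grid ++ [(ri, (ggWhile stitches clusters.toNat [] i).1.reverse)]
            else grid ++ [(ri, (ggWhile stitches clusters.toNat [] i).1)],
            ri + 1, (ggWhile stitches clusters.toNat [] i).2)
          = (grid ++ [mkOut ri []], ri + 1, i) := by
        rw [hc]
        exact Prod.ext (by rw [append_mkOut]; rfl) rfl
      show l.foldl _ (if PySem.Int.mod ri 2 ≠ 0 then
              grid ++ [(ri, (ggWhile stitches clusters.toNat [] i).1.reverse)]
            else grid ++ [(ri, (ggWhile stitches clusters.toNat [] i).1)],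
            ri + 1, (ggWhile stitches clusters.toNat [] i).2) = _
      rw [hstep, ih (grid ++ [mkOut ri []]) (ri + 1) i]
      refine Prod.ext ?_ (Prod.ext ?_ rfl)
      · show (grid ++ [mkOut ri []]) ++ _ = grid ++ _
        rw [List.append_assoc, List.length_cons, List.range_succ_eq_map, List.map_cons, List.map_map]
        refine congrArg (grid ++ ·) (List.cons_eq_cons.mpr ⟨by norm_num, ?_⟩)
        refine List.map_congr_left (fun k _ => ?_)
        simp only [Function.comp]
        congr 1
        push_cast; ring
      · show ri + 1 + ((l.length : Nat) : Int) = ri + (((x :: l).length : Nat) : Int)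
        simp only [List.length_cons]; push_cast; ring

theorem A_shape (stitches : List Int) (num_rows : Int) (clusters : Int)
    (hpre : Pre_grid_generator stitches num_rows clusters) :
    grid_generator stitches num_rows clusters =
      ((List.range num_rows.toNat).map
        (fun (k : Nat) => mkOut (1 + (k : Int))
          (rowAt stitches clusters.toNat ((k : Int) * (clusters.toNat : Int))))).reverse := by
  show ((PySem.List.pyRange 0 num_rows 1).foldl
      (fun (st : List (Int × List Int) × Int × Int) _num =>
        let grid := st.1
        let row_indicator := st.2.1
        let i := st.2.2
        let ri := ggWhile stitches clusters.toNat [] i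
        let grid' :=
          if PySem.Int.mod row_indicator 2 ≠ 0 then grid ++ [(row_indicator, ri.1.reverse)]
          else grid ++ [(row_indicator, ri.1)]
        (grid', row_indicator + 1, ri.2))
      ([], 1, 0)).1.reverse = _
  by_cases hnr : num_rows ≤ 0
  · rw [PySem.List.pyRange_one_eq_nil hnr]
    simp [Int.toNat_of_nonpos hnr]
  · by_cases hcl : clusters ≤ 0
    · have hc0 : clusters.toNat = 0 := Int.toNat_of_nonpos hcl
      rw [foldA0 stitches clusters hc0]
      dsimp only
      rw [List.nil_append, PySem.List.length_pyRange_one, sub_zero]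
      refine congrArg List.reverse (List.map_congr_left (fun k _ => ?_))
      rw [hc0, rowAt_zero]
    · rw [not_le] at hnr hcl
      have hs : stitches ≠ [] := fun h => hpre ⟨h, hnr, hcl⟩
      have hL : 0 < (stitches.length : Int) := by
        have := List.length_pos_iff.mpr hs
        exact_mod_cast this
      have h0 : (([], 1, 0) : List (Int × List Int) × Int × Int)
          = ([], 1, PySem.Int.mod 0 (stitches.length : Int)) := by
        rw [PySem.Int.mod_eq_emod_of_pos hL]
        simp
      rw [h0, foldA stitches clusters hs]
      dsimp only
      rw [List.nil_append, PySem.List.length_pyRange_one, sub_zero]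
      refine congrArg List.reverse (List.map_congr_left (fun k _ => ?_))
      rw [zero_add]

-- ---- B-side lemmas ----

theorem flat_length (xs : List Int) : ∀ (N : Nat), ((List.replicate N xs).flatten).length = N * xs.length := by
  intro N
  induction N with
  | zero => simp
  | succ N ih => simp [List.replicate_succ, ih, Nat.succ_mul]; ring

theorem flat_getD (xs : List Int) (hx : xs ≠ []) :
    ∀ (N p : Nat), p < N * xs.length →
      ((List.replicate N xs).flatten).getD p 0 = xs.getD (p % xs.length) 0 := by
  have hn : 0 < xs.length := List.length_pos_iff.mpr hx
  intro N
  induction N with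
  | zero => intro p hp; omega
  | succ N ih =>
      intro p hp
      rw [List.replicate_succ, List.flatten_cons]
      by_cases h : p < xs.length
      · rw [List.getD_append _ _ _ _ h, Nat.mod_eq_of_lt h]
      · push_neg at h
        have hp' : p < N * xs.length + xs.length := by rw [Nat.succ_mul] at hp; exact hp
        rw [List.getD_append_right _ _ _ _ h, ih (p - xs.length) (by omega)]
        congr 1
        have hpe : p = (p - xs.length) + xs.length := by omega
        conv_rhs => rw [hpe]
        rw [Nat.add_mod_right]

theorem chunk_eq (xs : List Int) (hx : xs ≠ []) :
    ∀ (m p N : Nat), p + m ≤ N * xs.length →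
      (((List.replicate N xs).flatten).drop p).take m = rowAt xs m (p : Int) := by
  intro m
  induction m with
  | zero => intro p N _; simp [rowAt_zero]
  | succ m ih =>
      intro p N hp
      have hplen : p < ((List.replicate N xs).flatten).length := by
        rw [flat_length]; omega
      rw [List.drop_eq_getElem_cons hplen, List.take_succ_cons, rowAt_succ]
      refine List.cons_eq_cons.mpr ⟨?_, ?_⟩
      · rw [← List.getD_eq_getElem _ 0 hplen, flat_getD xs hx N p (by omega),
          PySem.Int.mod_natCast, PySem.List.pyGetD_natCast]
      · have := ih (p + 1) N (by omega)
        rw [this]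
        norm_num

theorem enum_map {α β : Type} (f : Int × α → β) (d : α) :
    ∀ (l : List α) (s : Int),
      (PySem.List.enumerate l s).map f
        = (List.range l.length).map (fun (k : Nat) => f (s + (k : Int), l.getD k d)) := by
  intro l
  induction l with
  | nil => intro s; simp [PySem.List.enumerate_nil]
  | cons x l ih =>
      intro s
      rw [PySem.List.enumerate_cons, List.map_cons, ih (s + 1), List.length_cons,
        List.range_succ_eq_map, List.map_cons, List.map_map]
      refine List.cons_eq_cons.mpr ⟨by norm_num, ?_⟩
      refine List.map_congr_left (fun k _ => ?_)
      simp only [Function.comp, List.getD_cons_succ]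
      congr 2
      push_cast
      ring

theorem parity (k : Nat) :
    (PySem.Int.mod (1 + (k : Int)) 2 ≠ 0) ↔ PySem.Int.mod (k : Int) 2 = 0 := by
  rw [PySem.Int.mod_eq_emod_of_pos (by norm_num : (0:Int) < 2),
    PySem.Int.mod_eq_emod_of_pos (by norm_num : (0:Int) < 2)]
  omega

theorem point (row : List Int) (k : Nat) :
    ((0 : Int) + (k : Int) + 1,
      if PySem.Int.mod ((0 : Int) + (k : Int)) 2 = 0 then row.reverse else row)
      = mkOut (1 + (k : Int)) row := by
  rw [zero_add, mkOut]
  by_cases hpar : PySem.Int.mod ((k : Int)) 2 = 0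
  · rw [if_pos hpar, if_pos ((parity k).mpr hpar)]
    exact Prod.ext (add_comm (k : Int) 1) rfl
  · rw [if_neg hpar, if_neg (fun h => hpar ((parity k).mp h))]
    exact Prod.ext (add_comm (k : Int) 1) rfl

theorem B_shape (stitches : List Int) (num_rows : Int) (clusters : Int)
    (hpre : Pre_grid_generator stitches num_rows clusters) :
    grid_generator_alt stitches num_rows clusters =
      ((List.range num_rows.toNat).map
        (fun (k : Nat) => mkOut (1 + (k : Int))
          (rowAt stitches clusters.toNat ((k : Int) * (clusters.toNat : Int))))).reverse := by
  simp only [grid_generator_alt]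
  refine congrArg List.reverse ?_
  have hr : (max num_rows 0).toNat = num_rows.toNat := by omega
  have hc : (max clusters 0).toNat = clusters.toNat := by omega
  by_cases hcl : clusters ≤ 0
  · -- c = 0: chunks = [[]] * r, every row empty
    have hc0 : max clusters 0 = 0 := by omega
    rw [if_neg (by rw [hc0]; simp)]
    rw [PySem.List.pyRepeat_singleton, hr,
      enum_map _ ([] : List Int), List.length_replicate]
    refine List.map_congr_left (fun k hk => ?_)
    rw [List.getD_replicate _ (List.mem_range.mp hk),
      Int.toNat_of_nonpos hcl, rowAt_zero]
    exact point [] k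
  · push_neg at hcl
    have hcpos : (0 : Int) < max clusters 0 := by omega
    have hcc : ((clusters.toNat : Nat) : Int) = max clusters 0 := by omega
    rw [if_pos (by omega)]
    by_cases hnr : num_rows ≤ 0
    · -- r = 0: no rows at all
      have hr0 : max num_rows 0 = 0 := by omega
      rw [hr0, Int.toNat_of_nonpos hnr]
      simp [PySem.List.pyRange_of_pos _ _ hcpos]
    · push_neg at hnr
      have hs : stitches ≠ [] := fun h => hpre ⟨h, hnr, hcl⟩
      have hn : 0 < stitches.length := List.length_pos_iff.mpr hs
      have hL : (0 : Int) < (stitches.length : Int) := by exact_mod_cast hn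
      set r : Int := max num_rows 0 with hrdef
      set c : Int := max clusters 0 with hcdef
      have hrpos : 0 < r := by omega
      have htot : 0 < r * c := mul_pos hrpos hcpos
      -- the replication count: total ≤ reps * n
      set reps : Int := -(PySem.Int.floordiv (-(r * c)) (stitches.length : Int)) with hreps
      have hbound : (reps - 1) * (stitches.length : Int) < r * c ∧ r * c ≤ reps * (stitches.length : Int) :=
        (PySem.Int.neg_floordiv_neg_eq_iff_of_pos hL).mp hreps.symm
      have hrepsnn : 0 ≤ reps := by nlinarith [hbound.2, htot, hL]
      rw [if_pos (by omega)]
      -- the index list: pyRange 0 (r*c) c = [0, c, 2c, …, (r-1)c]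
      have hrange : PySem.List.pyRange 0 (r * c) c
          = (List.range r.toNat).map (fun (k : Nat) => c * (k : Int)) := by
        rw [PySem.List.pyRange_of_pos _ _ hcpos]
        have hcnt : ((r * c - 0 + c - 1) / c).toNat = r.toNat := by
          have : (r * c - 0 + c - 1) / c = r := by
            rw [sub_zero]
            have h1 : r * c + c - 1 = (c - 1) + r * c := by ring
            rw [h1, Int.add_mul_ediv_right _ _ (by omega : c ≠ 0),
              Int.ediv_eq_zero_of_lt (by omega) (by omega), zero_add]
          rw [this]
        rw [if_pos (by omega), hcnt]
        exact List.map_congr_left (fun k _ => by rw [zero_add])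
      rw [hrange, List.map_map]
      -- each chunk is rowAt
      have hchunk : ∀ k : Nat, k < r.toNat →
          PySem.List.slice (PySem.List.pyRepeat stitches reps)
            (some (c * (k : Int))) (some (c * (k : Int) + c))
          = rowAt stitches clusters.toNat ((k : Int) * (clusters.toNat : Int)) := by
        intro k hk
        have e1 : c * (k : Int) = ((clusters.toNat * k : Nat) : Int) := by
          push_cast [hcc]; ring
        have e2 : c * (k : Int) + c
            = ((clusters.toNat * k : Nat) : Int) + ((clusters.toNat : Nat) : Int) := by
          push_cast [hcc]; ring
        rw [e2, e1, PySem.List.slice_natCast_add]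
        show ((List.replicate reps.toNat stitches).flatten.drop (clusters.toNat * k)).take clusters.toNat = _
        have hle : clusters.toNat * k + clusters.toNat ≤ reps.toNat * stitches.length := by
          have hkr : ((k : Int) + 1) ≤ r := by
            have := List.mem_range.mpr hk
            omega
          have hInt : ((clusters.toNat * k + clusters.toNat : Nat) : Int)
              ≤ ((reps.toNat * stitches.length : Nat) : Int) := by
            push_cast [hcc, Int.toNat_of_nonneg hrepsnn]
            calc c * (k : Int) + c = ((k : Int) + 1) * c := by ring
              _ ≤ r * c := by nlinarith
              _ ≤ reps * (stitches.length : Int) := hbound.2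
          exact_mod_cast hInt
        rw [chunk_eq stitches hs clusters.toNat (clusters.toNat * k) reps.toNat hle]
        congr 1
        push_cast
        ring
      rw [enum_map _ ([] : List Int), List.length_map, List.length_range, hr]
      refine List.map_congr_left (fun k hk => ?_)
      have hk' : k < num_rows.toNat := List.mem_range.mp hk
      rw [PySem.List.getD_map_range _ _ _ _ hk']
      simp only [Function.comp]
      rw [hchunk k (by omega)]
      exact point _ k

-- ===== VERDICT (by name: the statement is the Claim_ definition above) =====
theorem grid_generator_spec : Claim_equal_grid_generator := by
  intro stitches num_rows clusters _hdom hpre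
  unfold Spec_grid_generator
  rw [A_shape stitches num_rows clusters hpre, B_shape stitches num_rows clusters hpre]
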